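-- pv_equiv track=rewrite | github.com/sodaMelon/20240405 | p4.py | programmer_string
-- ===== SOURCE A (Python) =====
-- def compare_all_values_bigger(dict1, original):
--   for key in dict1:
--       if key in original and dict1[key] >= original[key]:
--         continue
--       else:
--         return False
--   return True
--
-- def programmer_string(word):
--     answer_map = {
--         'p': 1,
--         'r': 3,
--         'o': 1,
--         'g': 1,
--         'a': 1,
--         'm': 2,
--         'e': 1
--     }
--     answer_scan_map1 = {
--         'p': 0,
--         'r': 0,
--         'o': 0,
--         'g': 0,
--         'a': 0,
--         'm': 0,
--         'e': 0
--     }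
--     answer_scan_map2 = answer_scan_map1.copy(); # reverse scan기록용
--     answer_index1 = 0 #left-search
--     answer_index2 = 0 #right-search
--     keys = answer_map.keys()
--
--     for index, char in enumerate(word): #인덱스 찾기1:순차 순회
--         if char in keys:
--             answer_scan_map1[char] += 1
--             if (answer_scan_map1['r'] >= 3) and (compare_all_values_bigger(answer_scan_map1,answer_map)):
--                 answer_index1 = index
--                 break
--
--     word_length = len(word)
--     for index in range(word_length - 1, -1, -1): # 문자열 길이부터 0까지 거꾸로 순회
--         char = word[index] # 해당 인덱스의 문자
--         if char in keys:
--             answer_scan_map2[char] += 1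
--             if (answer_scan_map2['r'] >= 3) and (compare_all_values_bigger(answer_scan_map2,answer_map)):
--                 answer_index2 = index
--                 break
--     if (answer_index1==answer_index2):
--       return 0
--     return (answer_index2-answer_index1)-1
-- ===== SOURCE B (Python) =====
-- REQ = (('p', 1), ('r', 3), ('o', 1), ('g', 1), ('a', 1), ('m', 2), ('e', 1))
--
--
-- def _kth_index(chars, c, k):
--     """Index of the k-th occurrence of c in chars, or None."""
--     seen = 0
--     for i, ch in enumerate(chars):
--         if ch == c:
--             seen += 1
--             if seen == k:
--                 return i
--     return None
--
--
-- def _boundary(chars):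
--     """Earliest index at which every required letter has reached its
--     required count, or None if some letter never does."""
--     best = -1
--     for c, n in REQ:
--         idx = _kth_index(chars, c, n)
--         if idx is None:
--             return None
--         best = max(best, idx)
--     return best
--
--
-- def programmer_string(word):
--     chars = list(word)
--     lb = _boundary(chars)
--     rb = _boundary(chars[::-1])
--     i1 = lb if lb is not None else 0
--     i2 = len(chars) - 1 - rb if rb is not None else 0
--     return 0 if i1 == i2 else (i2 - i1) - 1
-- ===== Notes on version B (the rewrite author's own statement) =====
-- stated objective: alternative
-- what changed: Replaces A's two stateful scan-until-all-counts-met loops over a mutable per-letter count dict with a per-letter k-th-occurrence formulation: the left boundary is the max of each required letter's n-th occurrence index, the right boundary is obtained the same way on the reversed string, with None propagated when a letter never reaches its count (matching A's 0 default).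
import Mathlib
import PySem

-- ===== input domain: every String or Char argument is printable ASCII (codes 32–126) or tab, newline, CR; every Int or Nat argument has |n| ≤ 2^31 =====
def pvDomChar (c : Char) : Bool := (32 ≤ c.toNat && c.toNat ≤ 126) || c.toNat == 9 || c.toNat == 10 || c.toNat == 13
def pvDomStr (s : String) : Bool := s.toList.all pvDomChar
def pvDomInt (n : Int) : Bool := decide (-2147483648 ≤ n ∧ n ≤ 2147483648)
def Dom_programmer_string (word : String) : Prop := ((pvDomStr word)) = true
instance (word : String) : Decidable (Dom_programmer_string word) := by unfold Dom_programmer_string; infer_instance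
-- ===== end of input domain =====

-- B replaces A's two scan-until-all-counts-met loops over a mutable count dict by
-- per-letter k-th-occurrence searches combined by max (left boundary) / reversal (right
-- boundary): an alternative decomposition of the same O(n) task.

-- ===== PORT A =====
-- answer_map literal dict
def answerMap : PySem.Dict Char Int :=
  PySem.Dict.ofList [('p',1),('r',3),('o',1),('g',1),('a',1),('m',2),('e',1)]

-- answer_scan_map1 literal (answer_scan_map2 is its .copy(), i.e. the same value)
def scanMapInit : PySem.Dict Char Int :=
  PySem.Dict.ofList [('p',0),('r',0),('o',0),('g',0),('a',0),('m',0),('e',0)]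

-- for key in dict1: early-return-False loop = all; dict1[key]/original[key] are getD
-- (the keys are present wherever Python evaluates them, so getD is exact here)
def compare_all_values_bigger (dict1 original : PySem.Dict Char Int) : Bool :=
  dict1.keys.all (fun key => original.contains key && decide (original.getD key 0 ≤ dict1.getD key 0))

-- for index, char in enumerate(word): index carried as an explicit counter; break = return index, no break = 0
def loopA1 : Int → List Char → PySem.Dict Char Int → Int
  | _, [], _ => 0
  | index, char :: rest, d =>
    if (answerMap.keys).contains char then
      let d' := d.modify char 0 (· + 1)
      if decide (3 ≤ d'.getD 'r' 0) && compare_all_values_bigger d' answerMap then index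
      else loopA1 (index + 1) rest d'
    else loopA1 (index + 1) rest d

-- for index in range(word_length - 1, -1, -1): char = word[index]  (index always in range, so pyGetD is exact)
def loopA2 : List Int → List Char → PySem.Dict Char Int → Int
  | [], _, _ => 0
  | index :: rest, w, d =>
    let char := PySem.List.pyGetD w index ' '
    if (answerMap.keys).contains char then
      let d' := d.modify char 0 (· + 1)
      if decide (3 ≤ d'.getD 'r' 0) && compare_all_values_bigger d' answerMap then index
      else loopA2 rest w d'
    else loopA2 rest w d

def programmer_string (word : String) : Int :=
  let chars := word.toList
  let answer_index1 := loopA1 0 chars scanMapInit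
  let answer_index2 := loopA2 (PySem.List.pyRange ((chars.length : Int) - 1) (-1) (-1)) chars scanMapInit
  if answer_index1 = answer_index2 then 0 else (answer_index2 - answer_index1) - 1

-- ===== PORT B =====
def REQ : List (Char × Int) := [('p',1),('r',3),('o',1),('g',1),('a',1),('m',2),('e',1)]

-- _kth_index: enumerate carried as an explicit counter i, seen accumulator
def kthIndexGo (c : Char) (k : Int) : List Char → Int → Int → Option Int
  | [], _, _ => none
  | ch :: rest, i, seen =>
    if ch = c then
      if seen + 1 = k then some i else kthIndexGo c k rest (i + 1) (seen + 1)
    else kthIndexGo c k rest (i + 1) seen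

def kthIndex (chars : List Char) (c : Char) (k : Int) : Option Int :=
  kthIndexGo c k chars 0 0

-- _boundary: fold over REQ with best accumulator, early None
def boundGo (chars : List Char) : List (Char × Int) → Int → Option Int
  | [], best => some best
  | (c, n) :: rest, best =>
    match kthIndex chars c n with
    | none => none
    | some idx => boundGo chars rest (max best idx)

def boundary (chars : List Char) : Option Int := boundGo chars REQ (-1)

def programmer_string_alt (word : String) : Int :=
  let chars := word.toList
  let lb := boundary chars
  let rb := boundary chars.reverse        -- chars[::-1]
  let i1 := match lb with | some b => b | none => 0
  let i2 := match rb with | some r => (chars.length : Int) - 1 - r | none => 0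
  if i1 = i2 then 0 else (i2 - i1) - 1

-- ===== PRECONDITION & SPEC =====
def Spec_programmer_string (word : String) (out : Int) : Prop := out = programmer_string_alt word
instance (word : String) (out : Int) : Decidable (Spec_programmer_string word out) := by unfold Spec_programmer_string; infer_instance

-- ===== CLAIM (what is proved, stated in full; the proofs are below) =====
def Claim_equal_programmer_string : Prop := ∀ (word : String), Dom_programmer_string word → Spec_programmer_string word (programmer_string word)

-- ===== LEMMAS AND PROOFS =====

-- the seven keys, in dict order
def KEYS : List Char := ['p','r','o','g','a','m','e']

-- Dict-free restatement of A's break condition, as a function of the seven counts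
def satV (v : Char → Int) : Bool := REQ.all (fun pr => decide (pr.2 ≤ v pr.1))

theorem keys_answerMap : answerMap.keys = KEYS := by decide

theorem satV_congr (v w : Char → Int) (h : ∀ c ∈ KEYS, v c = w c) : satV v = satV w := by
  simp only [satV, REQ, List.all_cons, List.all_nil,
    h 'p' (by decide), h 'r' (by decide), h 'o' (by decide), h 'g' (by decide),
    h 'a' (by decide), h 'm' (by decide), h 'e' (by decide)]

theorem satV_true_iff (v : Char → Int) : satV v = true ↔ ∀ pr ∈ REQ, pr.2 ≤ v pr.1 := by
  simp [satV]

theorem satV_false (v : Char → Int) (h : satV v = false) : ∃ pr ∈ REQ, v pr.1 < pr.2 := by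
  simp [satV, List.all_eq_false] at h
  obtain ⟨a, b, hm, hlt⟩ := h
  exact ⟨(a, b), hm, by simpa using hlt⟩

-- A's break condition on a dict with the canonical key set equals satV of its counts
theorem cond_eq_satV (d : PySem.Dict Char Int) (hk : d.keys = KEYS) :
    (decide (3 ≤ d.getD 'r' 0) && compare_all_values_bigger d answerMap)
      = satV (fun c => d.getD c 0) := by
  have c1 : answerMap.contains 'p' = true := by decide
  have c2 : answerMap.contains 'r' = true := by decide
  have c3 : answerMap.contains 'o' = true := by decide
  have c4 : answerMap.contains 'g' = true := by decide
  have c5 : answerMap.contains 'a' = true := by decide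
  have c6 : answerMap.contains 'm' = true := by decide
  have c7 : answerMap.contains 'e' = true := by decide
  have g1 : answerMap.getD 'p' 0 = 1 := by decide
  have g2 : answerMap.getD 'r' 0 = 3 := by decide
  have g3 : answerMap.getD 'o' 0 = 1 := by decide
  have g4 : answerMap.getD 'g' 0 = 1 := by decide
  have g5 : answerMap.getD 'a' 0 = 1 := by decide
  have g6 : answerMap.getD 'm' 0 = 2 := by decide
  have g7 : answerMap.getD 'e' 0 = 1 := by decide
  simp only [compare_all_values_bigger, hk, KEYS, satV, REQ, List.all_cons, List.all_nil,
    c1, c2, c3, c4, c5, c6, c7, g1, g2, g3, g4, g5, g6, g7, Bool.true_and, Bool.and_true]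
  rw [Bool.eq_iff_iff]
  simp only [Bool.and_eq_true, decide_eq_true_eq]
  omega

-- ----- lemmas about kthIndexGo -----

theorem kthIndexGo_none (c : Char) (k : Int) :
    ∀ (l : List Char) (i seen : Int), seen + (l.count c : Int) < k →
      kthIndexGo c k l i seen = none := by
  intro l
  induction l with
  | nil => intro i seen h; simp [kthIndexGo]
  | cons ch rest ih =>
    intro i seen h
    by_cases hc : ch = c
    · subst hc
      simp only [List.count_cons_self] at h
      have h1 : seen + 1 + (rest.count ch : Int) < k := by push_cast at h ⊢; omega
      have h2 : ¬ (seen + 1 = k) := by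
        have : (0 : Int) ≤ (rest.count ch : Int) := by positivity
        omega
      simp [kthIndexGo, h2, ih _ _ h1]
    · have h1 : seen + (rest.count c : Int) < k := by
        rw [List.count_cons_of_ne hc] at h; exact h
      simp [kthIndexGo, hc, ih _ _ h1]

theorem kthIndexGo_some (c : Char) (k : Int) :
    ∀ (l : List Char) (t : Nat) (i seen : Int),
      seen + ((l.take t).count c : Int) < k →
      k ≤ seen + ((l.take (t+1)).count c : Int) →
      kthIndexGo c k l i seen = some (i + t) := by
  intro l
  induction l with
  | nil => intro t i seen h1 h2; simp at h1 h2; omega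
  | cons ch rest ih =>
    intro t i seen h1 h2
    by_cases hc : ch = c
    · subst hc
      cases t with
      | zero =>
        simp only [List.take_zero, List.count_nil, Nat.cast_zero, add_zero] at h1
        simp only [List.take_succ_cons, List.take_zero, List.count_cons_self, List.count_nil] at h2
        have hk : seen + 1 = k := by push_cast at h2; omega
        simp [kthIndexGo, hk]
      | succ t' =>
        simp only [List.take_succ_cons, List.count_cons_self] at h1 h2
        have hne : ¬ (seen + 1 = k) := by
          have : (0 : Nat) ≤ (rest.take t').count ch := Nat.zero_le _
          push_cast at h1; omega
        have e1 : (seen + 1) + ((rest.take t').count ch : Int) < k := by push_cast at h1 ⊢; omega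
        have e2 : k ≤ (seen + 1) + ((rest.take (t' + 1)).count ch : Int) := by push_cast at h2 ⊢; omega
        rw [show (i + (t' + 1 : Nat) : Int) = (i + 1) + t' by push_cast; ring]
        simp [kthIndexGo, hne, ih t' (i + 1) (seen + 1) e1 e2]
    · cases t with
      | zero =>
        simp only [List.take_succ_cons, List.take_zero, List.count_cons_of_ne hc,
          List.count_nil, Nat.cast_zero, add_zero] at h1 h2
        omega
      | succ t' =>
        simp only [List.take_succ_cons, List.count_cons_of_ne hc] at h1 h2
        rw [show (i + (t' + 1 : Nat) : Int) = (i + 1) + t' by push_cast; ring]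
        simp [kthIndexGo, hc, ih t' (i + 1) seen h1 h2]

-- existence with an upper bound, from a sufficient prefix count
theorem kthIndex_exists_le (l : List Char) (c : Char) (k : Int) (P : Nat)
    (hk : 1 ≤ k) (h : k ≤ ((l.take (P+1)).count c : Int)) :
    ∃ t : Nat, t ≤ P ∧ kthIndex l c k = some t := by
  have hQ : ∃ t : Nat, k ≤ ((l.take (t + 1)).count c : Int) := ⟨P, h⟩
  classical
  set t0 := Nat.find hQ with ht0def
  have ht0 : k ≤ ((l.take (t0 + 1)).count c : Int) := Nat.find_spec hQ
  have ht0P : t0 ≤ P := Nat.find_le h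
  have hlt : ((l.take t0).count c : Int) < k := by
    rcases Nat.eq_zero_or_pos t0 with h0 | hpos
    · rw [h0]; simpa using hk
    · have hm : t0 - 1 < t0 := by omega
      have hmin := Nat.find_min hQ (ht0def ▸ hm)
      have he : t0 - 1 + 1 = t0 := by omega
      rw [he] at hmin
      omega
  refine ⟨t0, ht0P, ?_⟩
  have := kthIndexGo_some c k l t0 0 0 (by simpa using hlt) (by simpa using ht0)
  simpa [kthIndex] using this

theorem kthIndex_none (l : List Char) (c : Char) (k : Int)
    (h : (l.count c : Int) < k) : kthIndex l c k = none := by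
  apply kthIndexGo_none; simpa using h

-- ----- lemmas about boundGo -----

theorem boundGo_none (chars : List Char) :
    ∀ (rs : List (Char × Int)) (b : Int) (pr : Char × Int), pr ∈ rs →
      kthIndex chars pr.1 pr.2 = none → boundGo chars rs b = none := by
  intro rs
  induction rs with
  | nil => intro b pr hm; simp at hm
  | cons hd tl ih =>
    intro b pr hm hnone
    obtain ⟨c, n⟩ := hd
    rcases List.mem_cons.mp hm with he | hm'
    · rw [he] at hnone
      simp [boundGo, hnone]
    · simp only [boundGo]
      cases hkk : kthIndex chars c n with
      | none => rfl
      | some idx => exact ih _ pr hm' hnone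

theorem boundGo_some_max (chars : List Char) (P : Int) :
    ∀ (rs : List (Char × Int)) (b : Int), b ≤ P →
      (∀ pr ∈ rs, ∃ i : Int, kthIndex chars pr.1 pr.2 = some i ∧ i ≤ P) →
      ((∃ pr ∈ rs, kthIndex chars pr.1 pr.2 = some P) ∨ b = P) →
      boundGo chars rs b = some P := by
  intro rs
  induction rs with
  | nil =>
    intro b hb hall hdisj
    rcases hdisj with ⟨pr, hm, _⟩ | hbP
    · simp at hm
    · simp [boundGo, hbP]
  | cons hd tl ih =>
    intro b hb hall hdisj
    obtain ⟨c, n⟩ := hd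
    obtain ⟨i, hi, hile⟩ := hall (c, n) (List.mem_cons_self ..)
    simp only [boundGo, hi]
    refine ih (max b i) (by omega) (fun pr hm => hall pr (List.mem_cons_of_mem _ hm)) ?_
    rcases hdisj with ⟨pr, hm, hP⟩ | hbP
    · rcases List.mem_cons.mp hm with he | hm'
      · rw [he] at hP
        rw [hP] at hi
        have : i = P := by injection hi.symm
        right; omega
      · left; exact ⟨pr, hm', hP⟩
    · right; omega

-- ----- the Option-valued left-to-right loop and its relation to A's loops -----

def loopO : Int → List Char → PySem.Dict Char Int → Option Int
  | _, [], _ => none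
  | index, char :: rest, d =>
    if (answerMap.keys).contains char then
      let d' := d.modify char 0 (· + 1)
      if decide (3 ≤ d'.getD 'r' 0) && compare_all_values_bigger d' answerMap then some index
      else loopO (index + 1) rest d'
    else loopO (index + 1) rest d

theorem loopA1_eq_loopO : ∀ (l : List Char) (i : Int) (d : PySem.Dict Char Int),
    loopA1 i l d = (loopO i l d).getD 0 := by
  intro l
  induction l with
  | nil => intro i d; rfl
  | cons ch rest ih =>
    intro i d
    simp only [loopA1, loopO]
    split
    · split
      · rfl
      · exact ih _ _
    · exact ih _ _

theorem loopO_shift : ∀ (l : List Char) (i : Int) (d : PySem.Dict Char Int),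
    loopO i l d = (loopO 0 l d).map (· + i) := by
  intro l
  induction l with
  | nil => intro i d; rfl
  | cons ch rest ih =>
    intro i d
    simp only [loopO]
    split
    · split
      · simp
      · rw [ih (i + 1), ih (0 + 1)]
        cases loopO 0 rest _ with
        | none => simp
        | some j => simp only [Option.map_some]; simp; ring
    · rw [ih (i + 1), ih (0 + 1)]
      cases loopO 0 rest _ with
      | none => simp
      | some j => simp only [Option.map_some]; simp; ring

-- ----- MAIN: the loop equals the per-letter max formulation -----

theorem main_loopO : ∀ (r p : List Char) (d : PySem.Dict Char Int),
    d.keys = KEYS →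
    (∀ c ∈ KEYS, d.getD c 0 = (p.count c : Int)) →
    satV (fun c => (p.count c : Int)) = false →
    loopO (p.length : Int) r d = boundGo (p ++ r) REQ (-1) := by
  intro r
  induction r with
  | nil =>
    intro p d hk hv hs
    obtain ⟨pr, hm, hlt⟩ := satV_false _ hs
    rw [List.append_nil]
    exact (boundGo_none p REQ (-1) pr hm (kthIndex_none _ _ _ hlt)).symm
  | cons ch r' ih =>
    intro p d hk hv hs
    simp only [loopO]
    by_cases hc : ch ∈ KEYS
    · have hc' : (answerMap.keys).contains ch = true := by
        rw [keys_answerMap]; simpa using hc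
      rw [if_pos hc']
      have hcont : d.contains ch = true := (PySem.Dict.contains_iff_mem_keys d ch).mpr (hk ▸ hc)
      have hk' : (d.modify ch 0 (· + 1)).keys = KEYS := by
        rw [PySem.Dict.keys_modify, PySem.Dict.keys_insert_of_contains _ _ hcont, hk]
      have hv' : ∀ x ∈ KEYS, (d.modify ch 0 (· + 1)).getD x 0 = (((p ++ [ch]).count x : Nat) : Int) := by
        intro x hx
        rw [PySem.Dict.getD_modify]
        by_cases hxc : x = ch
        · subst hxc
          rw [if_pos rfl, hv x hx]
          simp [List.count_append]
        · rw [if_neg hxc, hv x hx]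
          have : [ch].count x = 0 := by simp [Ne.symm hxc]
          simp [List.count_append, this]
      have hcond : (decide (3 ≤ (d.modify ch 0 (· + 1)).getD 'r' 0)
            && compare_all_values_bigger (d.modify ch 0 (· + 1)) answerMap)
          = satV (fun c => (((p ++ [ch]).count c : Nat) : Int)) := by
        rw [cond_eq_satV _ hk']
        exact satV_congr _ _ (fun c hcK => hv' c hcK)
      rw [hcond]
      by_cases hsat : satV (fun c => (((p ++ [ch]).count c : Nat) : Int)) = true
      · rw [if_pos hsat]
        have hall : ∀ pr ∈ REQ, pr.2 ≤ (((p ++ [ch]).count pr.1 : Nat) : Int) :=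
          (satV_true_iff _).mp hsat
        have hl1 : (p ++ ch :: r').take (p.length + 1) = p ++ [ch] := by
          rw [show p ++ ch :: r' = (p ++ [ch]) ++ r' by simp]
          rw [List.take_left' (by simp)]
        have hl0 : (p ++ ch :: r').take p.length = p := List.take_left ..
        have hall' : ∀ pr ∈ REQ, ∃ i : Int,
            kthIndex (p ++ ch :: r') pr.1 pr.2 = some i ∧ i ≤ (p.length : Int) := by
          intro pr hm
          have hk1 : 1 ≤ pr.2 := by
            have : ∀ q ∈ REQ, 1 ≤ q.2 := by decide
            exact this pr hm
          obtain ⟨t, htP, hsome⟩ := kthIndex_exists_le (p ++ ch :: r') pr.1 pr.2 p.length hk1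
            (by rw [hl1]; exact hall pr hm)
          exact ⟨(t : Int), hsome, by exact_mod_cast htP⟩
        obtain ⟨pr0, hm0, hlt0⟩ := satV_false _ hs
        have h0 : kthIndex (p ++ ch :: r') pr0.1 pr0.2 = some (p.length : Int) := by
          have := kthIndexGo_some pr0.1 pr0.2 (p ++ ch :: r') p.length 0 0
            (by rw [hl0]; simpa using hlt0) (by rw [hl1]; simpa using hall pr0 hm0)
          simpa [kthIndex] using this
        exact (boundGo_some_max (p ++ ch :: r') (p.length : Int) REQ (-1) (by omega)
          hall' (Or.inl ⟨pr0, hm0, h0⟩)).symm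
      · rw [if_neg hsat]
        have hs' : satV (fun c => (((p ++ [ch]).count c : Nat) : Int)) = false :=
          Bool.eq_false_iff.mpr hsat
        have := ih (p ++ [ch]) (d.modify ch 0 (· + 1)) hk' hv' hs'
        rw [show (((p ++ [ch]).length : Nat) : Int) = (p.length : Int) + 1 by simp] at this
        rw [show (p ++ [ch]) ++ r' = p ++ ch :: r' by simp] at this
        exact this
    · have hc' : ¬ ((answerMap.keys).contains ch = true) := by
        rw [keys_answerMap]; simpa using hc
      rw [if_neg hc']
      have hcount : ∀ x ∈ KEYS, ((p ++ [ch]).count x : Nat) = p.count x := by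
        intro x hx
        have hxc : x ≠ ch := fun he => hc (he ▸ hx)
        have : [ch].count x = 0 := by simp [Ne.symm hxc]
        simp [List.count_append, this]
      have hv' : ∀ x ∈ KEYS, d.getD x 0 = (((p ++ [ch]).count x : Nat) : Int) := by
        intro x hx
        rw [hv x hx, hcount x hx]
      have hs' : satV (fun c => (((p ++ [ch]).count c : Nat) : Int)) = false := by
        rw [satV_congr _ _ (fun c hcK => by rw [hcount c hcK])]
        exact hs
      have := ih (p ++ [ch]) d hk hv' hs'
      rw [show (((p ++ [ch]).length : Nat) : Int) = (p.length : Int) + 1 by simp] at this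
      rw [show (p ++ [ch]) ++ r' = p ++ ch :: r' by simp] at this
      exact this

theorem loopA2_eq : ∀ (k : Nat) (w : List Char) (d : PySem.Dict Char Int), k ≤ w.length →
    loopA2 (PySem.List.pyRange ((k : Int) - 1) (-1) (-1)) w d
      = (match loopO 0 ((w.take k).reverse) d with
         | some j => (k : Int) - 1 - j
         | none => 0) := by
  intro k
  induction k with
  | zero =>
    intro w d _
    rw [show ((0 : Nat) : Int) - 1 = (-1 : Int) by norm_num]
    rw [PySem.List.pyRange_neg_one_eq_nil le_rfl]
    simp [loopA2, loopO]
  | succ k ih =>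
    intro w d hk
    have hklt : k < w.length := by omega
    rw [show (((k + 1 : Nat)) : Int) - 1 = ((k : Nat) : Int) by push_cast; ring]
    rw [PySem.List.pyRange_neg_one_cons (by omega)]
    have htake : (w.take (k + 1)).reverse = w[k] :: (w.take k).reverse := by
      rw [List.take_add_one, List.getElem?_eq_getElem hklt]
      simp
    rw [htake]
    simp only [loopA2, loopO]
    have hchar : PySem.List.pyGetD w ((k : Nat) : Int) ' ' = w[k] := by
      rw [PySem.List.pyGetD_natCast]
      exact List.getD_eq_getElem w ' ' hklt
    rw [hchar]
    split
    · split
      · push_cast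
        ring
      · rw [ih w _ (by omega), loopO_shift ((w.take k).reverse) (0 + 1)]
        cases loopO 0 ((w.take k).reverse) _ with
        | none => simp
        | some j => simp only [Option.map_some]; push_cast; ring
    · rw [ih w _ (by omega), loopO_shift ((w.take k).reverse) (0 + 1)]
      cases loopO 0 ((w.take k).reverse) _ with
      | none => simp
      | some j => simp only [Option.map_some]; push_cast; ring

theorem scanMapInit_eq :
    scanMapInit = PySem.Dict.mk [('p',0),('r',0),('o',0),('g',0),('a',0),('m',0),('e',0)] := by
  rfl

theorem scanMapInit_keys : scanMapInit.keys = KEYS := by rw [scanMapInit_eq]; rfl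

theorem scanMapInit_getD : ∀ c ∈ KEYS, scanMapInit.getD c 0 = 0 := by
  rw [scanMapInit_eq]
  intro c hc
  fin_cases hc <;> rfl

-- ===== VERDICT (by name: the statement is the Claim_ definition above) =====
theorem programmer_string_spec : Claim_equal_programmer_string := by
  unfold Claim_equal_programmer_string
  intro word _
  unfold Spec_programmer_string
  have hmain : ∀ l : List Char, loopO 0 l scanMapInit = boundGo l REQ (-1) := by
    intro l
    have := main_loopO l [] scanMapInit scanMapInit_keys
      (by intro c hc; rw [scanMapInit_getD c hc]; simp) (by decide)
    simpa using this
  simp only [programmer_string, programmer_string_alt, boundary]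
  rw [loopA1_eq_loopO, hmain]
  rw [loopA2_eq word.toList.length word.toList scanMapInit le_rfl]
  rw [List.take_length, hmain]
  cases h1 : boundGo word.toList REQ (-1) <;>
    cases h2 : boundGo word.toList.reverse REQ (-1) <;> simp
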